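-- pv_equiv track=rewrite | github.com/lehtiolab/msstitch | src/app/actions/psmtable/refine.py | count_protein_group_hits
-- ===== SOURCE A (Python) =====
-- def count_protein_group_hits(lineproteins, groups):
--     """Takes a list of protein accessions and a list of protein groups
--     content from DB. Counts for each group in list how many proteins
--     are found in lineproteins. Returns list of str amounts.
--     """
--     hits = []
--     for group in groups:
--         hits.append(0)
--         for protein in lineproteins:
--             if protein in group:
--                 hits[-1] += 1
--     return [str(x) for x in hits]
-- ===== SOURCE B (Python) =====
-- def count_protein_group_hits(lineproteins, groups):
--     counts = {}
--     for protein in lineproteins: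
--         counts[protein] = counts.get(protein, 0) + 1
--     return [str(sum(counts.get(p, 0) for p in set(group))) for group in groups]
-- ===== Notes on version B (the rewrite author's own statement) =====
-- stated objective: faster
-- what changed: Builds a frequency map of lineproteins once, then for each group sums the counts of its distinct members, instead of rescanning lineproteins (with an inner membership scan of the group) for every group.
import Mathlib
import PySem

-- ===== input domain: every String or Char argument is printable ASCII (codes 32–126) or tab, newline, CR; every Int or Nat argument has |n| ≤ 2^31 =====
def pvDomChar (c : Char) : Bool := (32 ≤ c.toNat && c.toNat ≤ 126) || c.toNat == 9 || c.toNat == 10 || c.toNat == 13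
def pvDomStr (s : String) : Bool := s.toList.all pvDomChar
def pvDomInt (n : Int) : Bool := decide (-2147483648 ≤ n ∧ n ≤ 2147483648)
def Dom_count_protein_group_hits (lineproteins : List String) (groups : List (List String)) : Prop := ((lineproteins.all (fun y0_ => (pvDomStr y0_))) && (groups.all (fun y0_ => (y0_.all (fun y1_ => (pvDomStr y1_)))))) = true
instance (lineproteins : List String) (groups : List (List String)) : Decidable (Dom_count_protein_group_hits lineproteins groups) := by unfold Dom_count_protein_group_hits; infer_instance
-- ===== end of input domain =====

-- B replaces A's per-group rescan of lineproteins by a frequency map built once plus a sum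
-- over each group's distinct members (objective: faster).

-- ===== PORT A =====
-- Nested loops: for each group, scan all of lineproteins counting members of the group
-- (hits.append(0); hits[-1] += 1 is the running counter for the current group).
def count_protein_group_hits (lineproteins : List String) (groups : List (List String)) : List String :=
  let hits : List Int := groups.foldl (fun hits group =>
    hits ++ [lineproteins.foldl
      (fun c protein => if group.contains protein then c + 1 else c) 0]) []
  hits.map (fun x => PySem.Int.toStr x)

-- ===== PORT B =====
-- counts[protein] = counts.get(protein, 0) + 1, then str(sum(counts.get(p, 0) for p in set(group))).
def count_protein_group_hits_alt (lineproteins : List String) (groups : List (List String)) : List String :=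
  let counts : PySem.Dict String Int :=
    lineproteins.foldl (fun d protein => d.insert protein (d.getD protein 0 + 1)) PySem.Dict.empty
  groups.map (fun group =>
    PySem.Int.toStr ((PySem.Set.ofList group).foldl (fun t p => t + counts.getD p 0) 0))

-- ===== PRECONDITION & SPEC =====
def Spec_count_protein_group_hits (lineproteins : List String) (groups : List (List String)) (out : List String) : Prop := out = count_protein_group_hits_alt lineproteins groups
instance (lineproteins : List String) (groups : List (List String)) (out : List String) : Decidable (Spec_count_protein_group_hits lineproteins groups out) := by unfold Spec_count_protein_group_hits; infer_instance

-- ===== CLAIM (what is proved, stated in full; the proofs are below) =====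
def Claim_equal_count_protein_group_hits : Prop := ∀ (lineproteins : List String) (groups : List (List String)), Dom_count_protein_group_hits lineproteins groups → Spec_count_protein_group_hits lineproteins groups (count_protein_group_hits lineproteins groups)

-- ===== LEMMAS AND PROOFS =====

-- B's frequency-map loop is exactly Counter(lineproteins).
lemma counts_eq_counter (L : List String) :
    L.foldl (fun d protein => d.insert protein (d.getD protein 0 + 1)) PySem.Dict.empty
      = PySem.Dict.counter L := by
  rw [PySem.Dict.counter_eq_foldl]
  rfl

-- Over a duplicate-free list, the 0/1-sum of (x == ·) is membership.
lemma sum_ite_eq_mem (x : String) (S : List String) (h : S.Nodup) :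
    (S.map fun p => if x == p then (1:Int) else 0).sum
      = if S.contains x then 1 else 0 := by
  induction S with
  | nil => simp
  | cons a S ih =>
    rcases List.nodup_cons.mp h with ⟨ha, hn⟩
    rw [List.map_cons, List.sum_cons, ih hn]
    by_cases hx : x = a
    · subst hx
      simp [List.contains_eq_mem, ha]
    · by_cases hm : S.contains x <;> simp [List.contains_eq_mem, hx]

-- Summing multiplicities of the distinct members of S equals counting occurrences in S.
lemma sum_counts (L S : List String) (h : S.Nodup) :
    (S.map fun p => ((L.count p : Nat) : Int)).sum
      = ((L.countP (fun x => S.contains x) : Nat) : Int) := by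
  induction L with
  | nil => simp
  | cons x L ih =>
    have hcnt : ∀ p : String, ((List.count p (x :: L) : Nat) : Int)
        = ((L.count p : Nat) : Int) + (if x == p then (1:Int) else 0) := by
      intro p; rw [List.count_cons]; split <;> push_cast <;> simp
    calc (S.map fun p => ((List.count p (x :: L) : Nat) : Int)).sum
        = (S.map fun p => ((L.count p : Nat) : Int) + (if x == p then (1:Int) else 0)).sum := by
          congr 1; exact List.map_congr_left (fun p _ => hcnt p)
      _ = (S.map fun p => ((L.count p : Nat) : Int)).sum
            + (S.map fun p => if x == p then (1:Int) else 0).sum := PySem.List.sum_map_add_int ..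
      _ = _ := by
          rw [ih, sum_ite_eq_mem x S h, List.countP_cons]
          split <;> push_cast <;> simp

-- ===== VERDICT (by name: the statement is the Claim_ definition above) =====
theorem count_protein_group_hits_spec : Claim_equal_count_protein_group_hits := by
  intro L G _
  unfold Spec_count_protein_group_hits count_protein_group_hits count_protein_group_hits_alt
  simp only [counts_eq_counter, PySem.List.foldl_append_singleton_eq_map, List.nil_append,
    List.map_map]
  apply List.map_congr_left
  intro g _
  simp only [Function.comp]
  congr 1
  rw [PySem.List.foldl_count_if, PySem.List.foldl_add]
  simp only [PySem.Dict.getD_counter]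
  rw [sum_counts L _ (PySem.Set.nodup_ofList g)]
  simp only [zero_add]
  congr 1
  apply List.countP_congr
  intro x _
  simp [List.contains_eq_mem, PySem.Set.mem_ofList]
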